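-- pv_equiv track=rewrite | github.com/shenning00/patch_mcp | src/patch_mcp/tools/inspect.py | _split_into_file_sections
-- ===== SOURCE A (Python) =====
-- from typing import Any, Dict, List
--
-- def _split_into_file_sections(patch: str) -> List[str]:
--     """Split a multi-file patch into individual file sections.
--
--     Args:
--         patch: Full patch content
--
--     Returns:
--         List of patch sections, one per file
--     """
--     sections = []
--     current_section = []
--     lines = patch.split("\n")
--
--     for line in lines:
--         # New file section starts with "---"
--         if line.startswith("---") and current_section:
--             # Save previous section
--             sections.append("\n".join(current_section))
--             current_section = [line]
--         else:
--             current_section.append(line)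
--
--     # Save last section
--     if current_section:
--         sections.append("\n".join(current_section))
--
--     return sections
-- ===== SOURCE B (Python) =====
-- def _split_into_file_sections(patch: str):
--     """Two-pointer chunk cutter: cut at each next '---' boundary and slice.
--
--     Structurally different from the accumulate-and-flush single pass:
--     the outer loop emits one complete section per iteration by scanning
--     ahead to the next boundary line (the first line never starts a cut).
--     """
--     lines = patch.split("\n")
--     sections = []
--     i = 0
--     n = len(lines)
--     while i < n:
--         j = i + 1
--         while j < n and not lines[j].startswith("---"):
--             j += 1
--         sections.append("\n".join(lines[i:j]))
--         i = j
--     return sections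
-- ===== Notes on version B (the rewrite author's own statement) =====
-- stated objective: alternative
-- what changed: Replaces the accumulate-and-flush single pass (mutable current_section flushed on each '---' line) with a two-pointer chunk cutter that scans ahead to the next '---' boundary and slices out one whole section per outer iteration.
import Mathlib
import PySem

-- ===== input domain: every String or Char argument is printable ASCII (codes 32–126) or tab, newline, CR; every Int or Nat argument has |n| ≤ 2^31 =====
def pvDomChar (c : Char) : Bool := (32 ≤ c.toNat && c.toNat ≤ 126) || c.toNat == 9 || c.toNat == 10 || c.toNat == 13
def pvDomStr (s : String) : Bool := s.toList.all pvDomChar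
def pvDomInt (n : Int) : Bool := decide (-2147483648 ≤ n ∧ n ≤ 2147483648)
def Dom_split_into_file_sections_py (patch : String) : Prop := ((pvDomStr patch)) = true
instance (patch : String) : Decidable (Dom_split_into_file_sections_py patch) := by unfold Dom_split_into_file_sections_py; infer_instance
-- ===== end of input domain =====

-- B: two-pointer chunk cutter (cut at each next '---' boundary line) instead of A's
-- accumulate-and-flush single pass; same O(n) cost, different decomposition.

-- ===== PORT A =====
-- one fold step of A's loop: flush on a '---' line when current_section is nonempty
def pvStepA (st : List String × List String) (line : String) : List String × List String :=
  if PySem.Str.startswith line "---" && !st.2.isEmpty then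
    (st.1 ++ [PySem.Str.join "\n" st.2], [line])
  else
    (st.1, st.2 ++ [line])

def split_into_file_sections_py (patch : String) : List String :=
  -- patch.split("\n"): sep is the nonempty "\n", so split? is always `some`
  let lines := (PySem.Str.split? patch "\n").getD []
  let st := lines.foldl pvStepA ([], [])
  if !st.2.isEmpty then st.1 ++ [PySem.Str.join "\n" st.2] else st.1

-- ===== PORT B =====
-- B's outer loop: emit the chunk running up to the next boundary line, recurse on the rest
def pvChunksB : List String → List (List String)
  | [] => []
  | l :: rest =>
      (l :: rest.takeWhile (fun s => !PySem.Str.startswith s "---"))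
        :: pvChunksB (rest.dropWhile (fun s => !PySem.Str.startswith s "---"))
  termination_by ls => ls.length
  decreasing_by
    simp only [List.length_cons]
    exact Nat.lt_succ_of_le (List.length_dropWhile_le _ _)

def split_into_file_sections_py_alt (patch : String) : List String :=
  (pvChunksB ((PySem.Str.split? patch "\n").getD [])).map (PySem.Str.join "\n")

-- ===== PRECONDITION & SPEC =====
def Spec_split_into_file_sections_py (patch : String) (out : List String) : Prop := out = split_into_file_sections_py_alt patch
instance (patch : String) (out : List String) : Decidable (Spec_split_into_file_sections_py patch out) := by unfold Spec_split_into_file_sections_py; infer_instance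

-- ===== CLAIM (what is proved, stated in full; the proofs are below) =====
def Claim_equal_split_into_file_sections_py : Prop := ∀ (patch : String), Dom_split_into_file_sections_py patch → Spec_split_into_file_sections_py patch (split_into_file_sections_py patch)

-- ===== LEMMAS AND PROOFS =====

-- A's grouping, written as a recursion on the remaining lines with the current chunk
def pvChunksAux (cur : List String) : List String → List (List String)
  | [] => [cur]
  | l :: ls =>
      if PySem.Str.startswith l "---" then cur :: pvChunksAux [l] ls
      else pvChunksAux (cur ++ [l]) ls

lemma pvChunksAux_eq (ls : List String) : ∀ cur : List String,
    pvChunksAux cur ls =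
      (cur ++ ls.takeWhile (fun s => !PySem.Str.startswith s "---"))
        :: pvChunksB (ls.dropWhile (fun s => !PySem.Str.startswith s "---")) := by
  induction ls with
  | nil => intro cur; simp only [pvChunksAux, List.takeWhile_nil, List.dropWhile_nil,
      List.append_nil, pvChunksB]
  | cons l ls ih =>
    intro cur
    by_cases hb : PySem.Str.startswith l "---" = true
    · have hbc : PySem.Chars.startswith l.toList ['-', '-', '-'] = true := by simpa using hb
      rw [List.takeWhile_cons_of_neg (by simp [hbc]), List.dropWhile_cons_of_neg (by simp [hbc])]
      simp only [pvChunksAux]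
      rw [if_pos hb, ih [l], pvChunksB, List.append_nil]
      rfl
    · have hbc : PySem.Chars.startswith l.toList ['-', '-', '-'] = false := by
        simpa using (by simpa using hb : PySem.Str.startswith l "---" = false)
      rw [List.takeWhile_cons_of_pos (by simp [hbc]), List.dropWhile_cons_of_pos (by simp [hbc])]
      simp only [pvChunksAux]
      rw [if_neg hb, ih (cur ++ [l]), List.append_assoc]
      rfl

lemma pvFoldA_snd_ne (ls : List String) : ∀ secs cur : List String, cur ≠ [] →
    (ls.foldl pvStepA (secs, cur)).2 ≠ [] := by
  induction ls with
  | nil => intro secs cur h; simpa using h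
  | cons l ls ih =>
    intro secs cur h
    simp only [List.foldl_cons, pvStepA]
    split_ifs <;> exact ih _ _ (by simp)

lemma pvFoldA_eq (ls : List String) : ∀ secs cur : List String, cur ≠ [] →
    (ls.foldl pvStepA (secs, cur)).1 ++ [PySem.Str.join "\n" (ls.foldl pvStepA (secs, cur)).2]
      = secs ++ (pvChunksAux cur ls).map (PySem.Str.join "\n") := by
  induction ls with
  | nil => intro secs cur h; simp [pvChunksAux]
  | cons l ls ih =>
    intro secs cur h
    have hne : cur.isEmpty = false := by simpa [List.isEmpty_iff] using h
    by_cases hb : PySem.Str.startswith l "---" = true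
    · have hbc : PySem.Chars.startswith l.toList ['-', '-', '-'] = true := by simpa using hb
      have hstep : pvStepA (secs, cur) l = (secs ++ [PySem.Str.join "\n" cur], [l]) := by
        simp [pvStepA, hbc, hne]
      rw [List.foldl_cons, hstep, ih _ [l] (by simp)]
      simp only [pvChunksAux]
      rw [if_pos hb]
      simp
    · have hb' : PySem.Str.startswith l "---" = false := by simpa using hb
      have hbc : PySem.Chars.startswith l.toList ['-', '-', '-'] = false := by simpa using hb'
      have hstep : pvStepA (secs, cur) l = (secs, cur ++ [l]) := by
        simp [pvStepA, hbc]
      rw [List.foldl_cons, hstep, ih _ (cur ++ [l]) (by simp)]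
      simp only [pvChunksAux]
      rw [if_neg hb]

lemma pv_main (lines : List String) :
    (if !(lines.foldl pvStepA ([], [])).2.isEmpty then
        (lines.foldl pvStepA ([], [])).1
          ++ [PySem.Str.join "\n" (lines.foldl pvStepA ([], [])).2]
      else (lines.foldl pvStepA ([], [])).1)
      = (pvChunksB lines).map (PySem.Str.join "\n") := by
  cases lines with
  | nil => simp [pvChunksB]
  | cons l ls =>
    have h1 : (l :: ls).foldl pvStepA ([], []) = ls.foldl pvStepA ([], [l]) := by
      simp [pvStepA]
    rw [h1]
    have hne := pvFoldA_snd_ne ls [] [l] (by simp)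
    have hE : (!(ls.foldl pvStepA ([], [l])).2.isEmpty) = true := by
      simpa [List.isEmpty_iff] using hne
    rw [if_pos hE, pvFoldA_eq ls [] [l] (by simp), pvChunksAux_eq ls [l]]
    simp only [pvChunksB, List.nil_append, List.singleton_append]

-- ===== VERDICT (by name: the statement is the Claim_ definition above) =====
theorem split_into_file_sections_py_spec : Claim_equal_split_into_file_sections_py := by
  intro patch _
  unfold Spec_split_into_file_sections_py split_into_file_sections_py split_into_file_sections_py_alt
  exact pv_main ((PySem.Str.split? patch "\n").getD [])
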